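-- pv_equiv track=rewrite | github.com/Project-KONDA/data-value-clustering | DataValueClustering/gui_center/cluster_representation.py | _fancy_cluster_representation_unsorted
-- ===== SOURCE A (Python) =====
-- def _fancy_cluster_representation_unsorted(values, clusters):
--     n_clusters = max(clusters) + 1
--     outer_list = list()
--     noise = list()
--     for i in range(n_clusters):
--         outer_list.append(list())
--     for j in range(len(values)):
--         x = int(clusters[j])
--         if x >= 0:
--             outer_list[x].append(values[j])
--         else:
--             noise.append(values[j])
--     return outer_list, noise
-- ===== SOURCE B (Python) =====
-- def _fancy_cluster_representation_unsorted(values, clusters):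
--     n_clusters = max(clusters) + 1
--     outer_list = [[values[j] for j in range(len(values)) if int(clusters[j]) == i]
--                   for i in range(n_clusters)]
--     noise = [values[j] for j in range(len(values)) if int(clusters[j]) < 0]
--     return outer_list, noise
-- ===== Notes on version B (the rewrite author's own statement) =====
-- stated objective: alternative
-- what changed: Replaces A's single routing pass that mutates bucket lists in place by k+1 independent scans: one comprehension per cluster id collecting its members, plus one final scan for noise.
import Mathlib
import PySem

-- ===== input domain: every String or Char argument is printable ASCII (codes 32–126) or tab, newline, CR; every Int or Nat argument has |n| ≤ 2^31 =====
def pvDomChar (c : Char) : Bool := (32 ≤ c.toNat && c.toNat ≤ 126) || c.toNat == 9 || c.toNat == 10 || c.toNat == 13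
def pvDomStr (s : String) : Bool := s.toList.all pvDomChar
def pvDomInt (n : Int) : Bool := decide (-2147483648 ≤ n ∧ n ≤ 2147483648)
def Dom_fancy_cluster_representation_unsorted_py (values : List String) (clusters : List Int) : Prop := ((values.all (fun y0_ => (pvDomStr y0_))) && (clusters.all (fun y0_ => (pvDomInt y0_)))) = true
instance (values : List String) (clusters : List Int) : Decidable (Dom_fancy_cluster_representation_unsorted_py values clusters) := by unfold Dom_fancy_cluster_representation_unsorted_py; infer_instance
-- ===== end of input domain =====

-- B restructures A's single routing pass into k+1 independent scans of `values` (one per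
-- cluster id, one for noise); same return value, no speed claim (alternative decomposition).

-- ===== PORT A =====
-- the body of A's routing loop: x = int(clusters[j]); route values[j] by sign of x
def pvStepA (values : List String) (clusters : List Int)
    (st : List (List String) × List String) (j : Int) : List (List String) × List String :=
  match PySem.List.pyGet? clusters j, PySem.List.pyGet? values j with
  | some x, some v =>
      if x ≥ 0 then (st.1.modify x.toNat (fun l => l ++ [v]), st.2)
      else (st.1, st.2 ++ [v])
  | _, _ => st  -- IndexError in Python (excluded by Pre_)

def fancy_cluster_representation_unsorted_py (values : List String) (clusters : List Int) :
    List (List String) × List String :=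
  match PySem.List.max? clusters (fun x => x) with
  | none => ([], [])  -- Python raises ValueError on max([]) (excluded by Pre_)
  | some m =>
      let outer0 := (PySem.List.pyRange 0 (m + 1) 1).foldl (fun acc _ => acc ++ [[]]) []
      (PySem.List.pyRange 0 (values.length : Int) 1).foldl (pvStepA values clusters) (outer0, [])

-- ===== PORT B =====
-- one comprehension scan: [values[j] for j in range(len(values)) if p(int(clusters[j]))]
def pvPickJs (values : List String) (clusters : List Int) (js : List Int) (p : Int → Bool) :
    List String :=
  js.filterMap (fun j =>
    match PySem.List.pyGet? clusters j, PySem.List.pyGet? values j with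
    | some x, some v => if p x then some v else none
    | _, _ => none)

def pvPick (values : List String) (clusters : List Int) (p : Int → Bool) : List String :=
  pvPickJs values clusters (PySem.List.pyRange 0 (values.length : Int) 1) p

def fancy_cluster_representation_unsorted_py_alt (values : List String) (clusters : List Int) :
    List (List String) × List String :=
  match PySem.List.max? clusters (fun x => x) with
  | none => ([], [])  -- Python raises ValueError on max([]) (excluded by Pre_)
  | some m =>
      ((PySem.List.pyRange 0 (m + 1) 1).map (fun i => pvPick values clusters (fun x => x == i)),
       pvPick values clusters (fun x => x < 0))

-- ===== PRECONDITION & SPEC =====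
-- Pre_ excludes exactly the inputs on which Python A raises: max([]) is a ValueError,
-- and clusters[j] for j < len(values) beyond len(clusters) is an IndexError.
def Pre_fancy_cluster_representation_unsorted_py (values : List String) (clusters : List Int) : Prop :=
  clusters ≠ [] ∧ values.length ≤ clusters.length
instance (values : List String) (clusters : List Int) : Decidable (Pre_fancy_cluster_representation_unsorted_py values clusters) := by unfold Pre_fancy_cluster_representation_unsorted_py; infer_instance

def pvWitness_fancy_cluster_representation_unsorted_py : List String × List Int :=
  (["a", "b", "c"], [1, -1, 0])

def Spec_fancy_cluster_representation_unsorted_py (values : List String) (clusters : List Int) (out : List (List String) × List String) : Prop := out = fancy_cluster_representation_unsorted_py_alt values clusters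
instance (values : List String) (clusters : List Int) (out : List (List String) × List String) : Decidable (Spec_fancy_cluster_representation_unsorted_py values clusters out) := by unfold Spec_fancy_cluster_representation_unsorted_py; infer_instance

-- ===== CLAIM (what is proved, stated in full; the proofs are below) =====
def Claim_equal_fancy_cluster_representation_unsorted_py : Prop := ∀ (values : List String) (clusters : List Int), Dom_fancy_cluster_representation_unsorted_py values clusters → Pre_fancy_cluster_representation_unsorted_py values clusters → Spec_fancy_cluster_representation_unsorted_py values clusters (fancy_cluster_representation_unsorted_py values clusters)

-- ===== LEMMAS AND PROOFS =====

-- building the k empty buckets is appending `replicate` many []s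
theorem pvOuter0_eq (l : List Int) (acc : List (List String)) :
    l.foldl (fun acc _ => acc ++ [([] : List String)]) acc
      = acc ++ List.replicate l.length [] := by
  induction l generalizing acc with
  | nil => simp
  | cons j js ih =>
      simp [List.foldl_cons, ih, List.replicate_succ]

-- the noise component of A's fold is the (<0)-scan
theorem pvSnd_foldA (values : List String) (clusters : List Int) (js : List Int)
    (o : List (List String)) (ns : List String) :
    (js.foldl (pvStepA values clusters) (o, ns)).2
      = ns ++ pvPickJs values clusters js (fun x => x < 0) := by
  induction js generalizing o ns with
  | nil => simp [pvPickJs]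
  | cons j js ih =>
      simp only [List.foldl_cons, pvStepA, pvPickJs, List.filterMap_cons]
      cases hc : PySem.List.pyGet? clusters j with
      | none => simpa [pvPickJs] using ih o ns
      | some x =>
        cases hv : PySem.List.pyGet? values j with
        | none => simpa [pvPickJs] using ih o ns
        | some v =>
          by_cases hx : x ≥ 0
          · have hx' : ¬ (x < 0) := by omega
            simpa [hx, hx', pvPickJs] using ih (o.modify x.toNat (fun l => l ++ [v])) ns
          · have hx' : x < 0 := by omega
            simpa [hx, hx', pvPickJs, List.append_assoc] using ih o (ns ++ [v])

-- bucket k of A's fold is the (== k)-scan appended to bucket k of the start state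
theorem pvFst_foldA (values : List String) (clusters : List Int) (js : List Int)
    (o : List (List String)) (ns : List String) (k : Nat) :
    (js.foldl (pvStepA values clusters) (o, ns)).1[k]?
      = (o[k]?).map (fun l => l ++ pvPickJs values clusters js (fun x => x == (k : Int))) := by
  induction js generalizing o ns with
  | nil => simp [pvPickJs]
  | cons j js ih =>
      simp only [List.foldl_cons, pvStepA, pvPickJs, List.filterMap_cons]
      cases hc : PySem.List.pyGet? clusters j with
      | none => simpa [pvPickJs] using ih o ns
      | some x =>
        cases hv : PySem.List.pyGet? values j with
        | none => simpa [pvPickJs] using ih o ns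
        | some v =>
          by_cases hx : x ≥ 0
          · simp only [hx, if_true]
            rw [ih, List.getElem?_modify]
            by_cases hk : x = (k : Int)
            · have hkn : x.toNat = k := by omega
              simp only [hk, beq_self_eq_true, if_true, pvPickJs]
              cases o[k]? <;> simp [List.append_assoc]
            · have hkn : ¬ (x.toNat = k) := by omega
              have hk' : (x == (k : Int)) = false := by simp [hk]
              simp only [if_neg hkn, hk', pvPickJs]
              simp
          · have hk' : (x == (k : Int)) = false := by
              simp only [beq_eq_false_iff_ne]; omega
            have hx' : ¬ x ≥ 0 := hx
            simp only [if_neg hx', hk']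
            simpa [pvPickJs] using ih o (ns ++ [v])
-- ===== VERDICT (by name: the statement is the Claim_ definition above) =====
theorem fancy_cluster_representation_unsorted_py_spec : Claim_equal_fancy_cluster_representation_unsorted_py := by
  intro values clusters _ _
  unfold Spec_fancy_cluster_representation_unsorted_py
  unfold fancy_cluster_representation_unsorted_py fancy_cluster_representation_unsorted_py_alt
  cases hm : PySem.List.max? clusters (fun x => x) with
  | none => rfl
  | some m =>
      simp only []
      refine Prod.ext ?_ ?_
      · apply List.ext_getElem?
        intro k
        rw [pvFst_foldA]
        rw [pvOuter0_eq, List.nil_append, List.getElem?_map]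
        rw [List.getElem?_replicate, PySem.List.getElem?_pyRange_one]
        rw [PySem.List.length_pyRange_one]
        by_cases hk : (k : Int) ≤ m
        · have h1 : k < (m + 1 - 0).toNat := by omega
          simp [hk, pvPick]
        · have h1 : ¬ k < (m + 1 - 0).toNat := by omega
          simp [hk]
      · rw [pvSnd_foldA, List.nil_append]
        rfl
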